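-- pv_equiv track=rewrite | github.com/mglevitt/DSC20 | DSC20/hw05.py | k_mapping
-- ===== SOURCE A (Python) =====
-- def k_mapping(inp, k):
--     """
--     Maps each element in the circular list to the
--     element k spaces in front of it.
--
--     >>> k_mapping([1, 2, 3, 4, 5], 2)
--     '1 -> 3, 3 -> 5, 5 -> 2, 2 -> 4, 4 -> 1'
--     >>> k_mapping([1, 2, 3], 3)
--     '1 -> 1, 2 -> 2, 3 -> 3'
--
--     +++++++++++++++++++++++++
--     WRITE YOUR DOCTESTS BELOW
--     +++++++++++++++++++++++++
--     >>> k_mapping([1, 2, 3, 4, 5,6,7,8,9,10,11,12], 1)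
--     '1 -> 2, 2 -> 3, 3 -> 4, 4 -> 5, 5 -> 6, 6 -> 7, 7 -> 8, 8 -> 9, 9 -> 10, \
-- 10 -> 11, 11 -> 12, 12 -> 1'
--     >>> k_mapping([1, 2, 3, 4, 5,6,7,8,9,10,11], 5)
--     '1 -> 6, 6 -> 11, 11 -> 5, 5 -> 10, 10 -> 4, 4 -> 9, 9 -> 3, 3 -> 8, 8 -> \
-- 2, 2 -> 7, 7 -> 1'
--     >>> k_mapping([1, 2, 3, 4, 5,6,7,8,9,10], 25)
--     '1 -> 6, 6 -> 1, 1 -> 6, 6 -> 1, 1 -> 6, 6 -> 1, 1 -> 6, 6 -> 1, 1 -> 6, \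
-- 6 -> 1'
--     """
--     out=''
--     count=0
--     in1=0
--     in2=0
--     end=2
--     while count<len(inp):
--         in2=in1+k
--         while in2>=len(inp):
--             in2-=len(inp)
--         out+=str(inp[in1])+' -> '+str(inp[in2])+', '
--         if in1==in2:
--             in1+=1
--         else:
--             in1=in2
--         count+=1
--     return out[:len(out)-end]
-- ===== SOURCE B (Python) =====
-- def k_mapping(inp, k):
--     n = len(inp)
--     if n == 0:
--         return ''
--     step = k % n
--     if step == 0:
--         parts = ['{0} -> {0}'.format(x) for x in inp]
--     else:
--         parts = ['{0} -> {1}'.format(inp[t * step % n], inp[(t + 1) * step % n])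
--                  for t in range(n)]
--     return ', '.join(parts)
-- ===== Notes on version B (the rewrite author's own statement) =====
-- stated objective: alternative
-- what changed: B replaces A's stateful chain-following loop (running pointer reduced by repeated subtraction, mutated string accumulator, trailing-separator trimming) by a direct closed-form index formula (t*step mod n, with step = k mod n) building the parts list and joining with ', '.
-- crash fix: On a nonempty list with k <= -2 A walks its index off the front of the list and raises IndexError; B returns the modular mapping (e.g. k_mapping([1,2],-2) = '1 -> 1, 2 -> 2'). — e.g. on k_mapping([1, 2], -2): A raises IndexError, B returns "1 -> 1, 2 -> 2"
import Mathlib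
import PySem

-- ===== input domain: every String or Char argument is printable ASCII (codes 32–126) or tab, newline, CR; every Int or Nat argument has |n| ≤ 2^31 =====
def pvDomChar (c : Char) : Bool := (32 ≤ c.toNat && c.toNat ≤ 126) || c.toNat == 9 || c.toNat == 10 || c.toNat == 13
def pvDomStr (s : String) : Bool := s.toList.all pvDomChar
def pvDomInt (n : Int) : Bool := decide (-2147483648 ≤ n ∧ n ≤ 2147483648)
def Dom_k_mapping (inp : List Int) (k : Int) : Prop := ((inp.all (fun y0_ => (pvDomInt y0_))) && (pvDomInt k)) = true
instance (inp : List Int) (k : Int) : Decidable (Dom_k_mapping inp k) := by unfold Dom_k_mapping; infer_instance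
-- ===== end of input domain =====

-- B replaces A's stateful chain-walking loop by a closed-form index formula (t*step mod n); equal on Pre_ (A raises IndexError for k ≤ -2 on nonempty input, excluded).


-- ===== PORT A =====
-- inner 'while in2 >= len(inp)': the '0 < n' conjunct only makes the recursion total;
-- A only runs it with n = len(inp) ≥ 1, where it is exactly Python's loop
def pvRed (x n : Int) : Int :=
  if _h : n ≤ x ∧ 0 < n then pvRed (x - n) n else x
termination_by x.toNat
decreasing_by omega

-- 'while count < len(inp)': fuel = len(inp) - count; state (in1, out); out built as List Char
def pvLoopA (inp : List Int) (k : Int) : Nat → Int → List Char → List Char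
  | 0, _, out => out
  | m + 1, in1, out =>
    let in2 := pvRed (in1 + k) (inp.length : Int)
    let out := out ++ PySem.Int.toChars (PySem.List.pyGetD inp in1 0) ++ (" -> ").toList
                   ++ PySem.Int.toChars (PySem.List.pyGetD inp in2 0) ++ (", ").toList
    pvLoopA inp k m (if in1 = in2 then in1 + 1 else in2) out

def k_mapping (inp : List Int) (k : Int) : String :=
  let out := pvLoopA inp k inp.length 0 []
  String.ofList (PySem.List.slice out none (some ((out.length : Int) - 2)))

-- ===== PORT B =====
def k_mapping_alt (inp : List Int) (k : Int) : String :=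
  let n := inp.length
  if n = 0 then "" else
  let step := PySem.Int.mod k (n : Int)
  let parts : List (List Char) :=
    if step = 0 then
      inp.map (fun x => PySem.Int.toChars x ++ (" -> ").toList ++ PySem.Int.toChars x)
    else
      (List.range n).map (fun (t : Nat) =>
        PySem.Int.toChars (PySem.List.pyGetD inp (PySem.Int.mod ((t : Int) * step) (n : Int)) 0)
        ++ (" -> ").toList
        ++ PySem.Int.toChars (PySem.List.pyGetD inp (PySem.Int.mod (((t : Int) + 1) * step) (n : Int)) 0))
  String.ofList (PySem.Chars.join (", ").toList parts)

-- ===== PRECONDITION & SPEC =====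
-- Pre_ excludes exactly the inputs where A raises IndexError: k ≤ -2 on a nonempty list
-- (A's pointer walks off the front of the list); A returns normally everywhere else.
def Pre_k_mapping (inp : List Int) (k : Int) : Prop := inp = [] ∨ -1 ≤ k
instance (inp : List Int) (k : Int) : Decidable (Pre_k_mapping inp k) := by
  unfold Pre_k_mapping; infer_instance
def pvWitness_k_mapping : List Int × Int := ([1, 2, 3, 4, 5], 2)

-- On a nonempty list with k ≤ -2, A raises IndexError; B returns the modular circular mapping.
def Raises_k_mapping (inp : List Int) (k : Int) : Prop := inp ≠ [] ∧ k ≤ -2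
instance (inp : List Int) (k : Int) : Decidable (Raises_k_mapping inp k) := by
  unfold Raises_k_mapping; infer_instance
def pvRaiseWitness_k_mapping : List Int × Int := ([1, 2], -2)
def pvRaiseWitnessOut_k_mapping : String := "1 -> 1, 2 -> 2"

def Spec_k_mapping (inp : List Int) (k : Int) (out : String) : Prop := out = k_mapping_alt inp k
instance (inp : List Int) (k : Int) (out : String) : Decidable (Spec_k_mapping inp k out) := by
  unfold Spec_k_mapping; infer_instance

-- ===== CLAIM (what is proved, stated in full; the proofs are below) =====
def Claim_equal_k_mapping : Prop := ∀ (inp : List Int) (k : Int), Dom_k_mapping inp k → Pre_k_mapping inp k → Spec_k_mapping inp k (k_mapping inp k)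
def Claim_raises_k_mapping : Prop := (∀ (inp : List Int) (k : Int), Dom_k_mapping inp k → Raises_k_mapping inp k → ¬ Pre_k_mapping inp k) ∧ (Dom_k_mapping (pvRaiseWitness_k_mapping.1) (pvRaiseWitness_k_mapping.2) ∧ Raises_k_mapping (pvRaiseWitness_k_mapping.1) (pvRaiseWitness_k_mapping.2) ∧ k_mapping_alt (pvRaiseWitness_k_mapping.1) (pvRaiseWitness_k_mapping.2) = pvRaiseWitnessOut_k_mapping)

-- ===== LEMMAS AND PROOFS =====

-- the pair printed for position t when the walk is t*step mod n (step ≠ 0 branch)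
def pvChunkS (inp : List Int) (step : Int) (t : Nat) : List Char :=
  PySem.Int.toChars (PySem.List.pyGetD inp (PySem.Int.mod ((t : Int) * step) (inp.length : Int)) 0)
  ++ (" -> ").toList
  ++ PySem.Int.toChars (PySem.List.pyGetD inp (PySem.Int.mod (((t : Int) + 1) * step) (inp.length : Int)) 0)

-- the pair printed for position t when step = 0 and k ≥ 0 (walk is t ↦ t)
def pvChunk0 (inp : List Int) (t : Nat) : List Char :=
  PySem.Int.toChars (PySem.List.pyGetD inp (t : Int) 0)
  ++ (" -> ").toList
  ++ PySem.Int.toChars (PySem.List.pyGetD inp (t : Int) 0)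

lemma pvRed_emod_aux : ∀ (a : Nat) (x n : Int), x.toNat = a → 0 ≤ x → 0 < n → pvRed x n = x % n := by
  intro a
  induction a using Nat.strong_induction_on with
  | _ a ih =>
    intro x n hxa hx hn
    rw [pvRed]
    by_cases h : n ≤ x ∧ 0 < n
    · rw [dif_pos h, ih (x - n).toNat (by omega) (x - n) n rfl (by omega) hn]
      have e : x - n = x + n * (-1) := by ring
      rw [e, Int.add_mul_emod_self_left]
    · rw [dif_neg h, Int.emod_eq_of_lt hx (by omega)]

lemma pvRed_emod (x n : Int) (hx : 0 ≤ x) (hn : 0 < n) : pvRed x n = x % n :=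
  pvRed_emod_aux x.toNat x n rfl hx hn

lemma pvRed_of_lt (x n : Int) (h : x < n) : pvRed x n = x := by
  rw [pvRed]; simp only [dite_eq_ite, ite_eq_right_iff]; omega

-- a Python index in [-n, n) reads the same element as its value mod n
lemma pyGetD_emod (inp : List Int) (i : Int) (h1 : -(inp.length : Int) ≤ i)
    (h2 : i < (inp.length : Int)) :
    PySem.List.pyGetD inp i 0 = PySem.List.pyGetD inp (i % (inp.length : Int)) 0 := by
  by_cases hi : 0 ≤ i
  · rw [Int.emod_eq_of_lt hi h2]
  · have hn : 0 < (inp.length : Int) := by omega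
    have hmod : i % (inp.length : Int) = i + inp.length := by
      have e : i = (i + (inp.length : Int)) + (inp.length : Int) * (-1) := by ring
      conv_lhs => rw [e]
      rw [Int.add_mul_emod_self_left, Int.emod_eq_of_lt (by omega) (by omega)]
    rw [hmod]
    have h3 : ¬ (0 ≤ i) := by omega
    have h4 : 0 ≤ i + (inp.length : Int) := by omega
    have h5 : i + (inp.length : Int) < (inp.length : Int) := by omega
    have h6 : inp.length - (-i).toNat = (i + (inp.length : Int)).toNat := by omega
    simp [PySem.List.pyGetD, PySem.List.pyGet?, PySem.List.pyIdx?, h1, h3, h4, h5, h6]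

lemma length_flatMap_chunk_ge (c : List Char) (l : List (List Char)) :
    2 ≤ ((c :: l).flatMap (fun p => p ++ (", ").toList)).length := by
  simp [List.flatMap_cons, List.length_append]
  omega

lemma slice_drop2 (out : List Char) (h : 2 ≤ out.length) :
    PySem.List.slice out none (some ((out.length : Int) - 2)) = out.take (out.length - 2) := by
  simp only [PySem.List.slice, PySem.List.clampIdx]
  have h1 : ¬ ((out.length : Int) - 2 < 0) := by omega
  have h2 : ((out.length : Int) - 2).toNat = out.length - 2 := by omega
  have h3 : min ((out.length : Int) - 2).toNat out.length = out.length - 2 := by omega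
  simp [h1, h2]

lemma take_append_sub (X B : List Char) (h : 2 ≤ B.length) :
    (X ++ B).take ((X ++ B).length - 2) = X ++ B.take (B.length - 2) := by
  have h1 : (X ++ B).length - 2 = X.length + (B.length - 2) := by
    simp only [List.length_append]; omega
  rw [h1, List.take_append, List.take_of_length_le (by omega), Nat.add_sub_cancel_left]

lemma take_flatMap_eq_join : ∀ (l : List (List Char)),
    (l.flatMap (fun p => p ++ (", ").toList)).take
      ((l.flatMap (fun p => p ++ (", ").toList)).length - 2)
    = PySem.Chars.join (", ").toList l := by
  intro l
  induction l with
  | nil => simp [PySem.Chars.join_nil]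
  | cons c l ih =>
    cases l with
    | nil =>
      simp only [List.flatMap_cons, List.flatMap_nil, List.append_nil, PySem.Chars.join_singleton]
      have h : (c ++ (", ").toList).length - 2 = c.length := by
        simp [List.length_append]
      rw [h, List.take_left]
    | cons c' l' =>
      have hrest := length_flatMap_chunk_ge c' l'
      rw [PySem.Chars.join_cons_cons]
      simp only [List.flatMap_cons] at hrest ih ⊢
      rw [take_append_sub _ _ hrest, ih, List.append_assoc]

-- assembling: A's trailing-", " concat + final slice  =  B's ", ".join
lemma assemble (parts : List (List Char)) :
    String.ofList (PySem.List.slice (parts.flatMap (fun p => p ++ (", ").toList)) none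
      (some (((parts.flatMap (fun p => p ++ (", ").toList)).length : Int) - 2)))
    = String.ofList (PySem.Chars.join (", ").toList parts) := by
  cases parts with
  | nil => rfl
  | cons c l =>
    rw [slice_drop2 _ (length_flatMap_chunk_ge c l), take_flatMap_eq_join]

lemma emod_step (N s t k : Int) (hs : s = k % N) (hs0 : 0 ≤ s) (hsN : s < N) :
    ((t * s) % N + k) % N = ((t + 1) * s) % N := by
  have h1 : ((t * s) % N + k) % N = (t * s + k) % N := by
    rw [Int.add_emod ((t * s) % N) k, Int.emod_emod_of_dvd _ dvd_rfl, ← Int.add_emod]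
  have h2 : (t * s + k) % N = (t * s + s) % N := by
    rw [Int.add_emod (t * s) k, Int.add_emod (t * s) s, ← hs, Int.emod_eq_of_lt hs0 hsN]
  rw [h1, h2]
  congr 1
  ring

lemma emod_step_ne (N s t : Int) (hs0 : 0 < s) (hsN : s < N) :
    (t * s) % N ≠ ((t + 1) * s) % N := by
  intro hEq
  rw [Int.emod_eq_emod_iff_emod_sub_eq_zero] at hEq
  have he : t * s - (t + 1) * s = -s := by ring
  rw [he] at hEq
  have hd : N ∣ s := (dvd_neg).mp (Int.dvd_of_emod_eq_zero hEq)
  have := Int.le_of_dvd hs0 hd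
  omega

lemma mod_neg_one (N : Int) (hN : 0 < N) : PySem.Int.mod (-1) N = N - 1 := by
  rw [PySem.Int.mod_eq_emod_of_pos hN]
  have e : (-1 : Int) = (N - 1) + N * (-1) := by ring
  rw [e, Int.add_mul_emod_self_left, Int.emod_eq_of_lt (by omega) (by omega)]

lemma map_chunk0 (inp : List Int) :
    inp.map (fun x => PySem.Int.toChars x ++ (" -> ").toList ++ PySem.Int.toChars x)
      = (List.range inp.length).map (pvChunk0 inp) := by
  apply List.ext_getElem
  · simp
  · intro i h1 h2
    have hi : i < inp.length := by simpa using h1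
    simp only [List.getElem_map, List.getElem_range, pvChunk0]
    rw [PySem.List.pyGetD_natCast, List.getD_eq_getElem _ _ hi]

-- loop lemma, k ≥ 0, step ≠ 0: the pointer at iteration t is (t*step) mod n
lemma loopA_pos (inp : List Int) (k : Int) (hk : 0 ≤ k)
    (hstep : PySem.Int.mod k (inp.length : Int) ≠ 0) :
    ∀ (m t : Nat) (out : List Char), t + m = inp.length →
      pvLoopA inp k m (PySem.Int.mod ((t : Int) * PySem.Int.mod k (inp.length : Int)) (inp.length : Int)) out
        = out ++ (List.range' t m).flatMap
            (fun s => pvChunkS inp (PySem.Int.mod k (inp.length : Int)) s ++ (", ").toList) := by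
  intro m
  induction m with
  | zero => intro t out h; simp [pvLoopA]
  | succ m ih =>
    intro t out h
    have hn : 0 < inp.length := by omega
    have hN : (0 : Int) < (inp.length : Int) := by exact_mod_cast hn
    have hmm : PySem.Int.mod k (inp.length : Int) = k % (inp.length : Int) :=
      PySem.Int.mod_eq_emod_of_pos hN
    have hs0 : 0 < k % (inp.length : Int) := by
      have h1 : 0 ≤ k % (inp.length : Int) := Int.emod_nonneg _ (by omega)
      have h2 : k % (inp.length : Int) ≠ 0 := by rw [← hmm]; exact hstep
      omega
    have hsN : k % (inp.length : Int) < (inp.length : Int) := Int.emod_lt_of_pos _ hN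
    have hx0 : 0 ≤ PySem.Int.mod ((t : Int) * PySem.Int.mod k (inp.length : Int)) (inp.length : Int) := by
      rw [PySem.Int.mod_eq_emod_of_pos hN]; exact Int.emod_nonneg _ (by omega)
    have hin2 : pvRed (PySem.Int.mod ((t : Int) * PySem.Int.mod k (inp.length : Int)) (inp.length : Int) + k) (inp.length : Int)
        = PySem.Int.mod (((t : Int) + 1) * PySem.Int.mod k (inp.length : Int)) (inp.length : Int) := by
      rw [pvRed_emod _ _ (by omega) hN]
      simp only [PySem.Int.mod_eq_emod_of_pos hN]
      exact emod_step _ _ _ _ rfl (by omega) hsN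
    have hneq : PySem.Int.mod ((t : Int) * PySem.Int.mod k (inp.length : Int)) (inp.length : Int)
        ≠ PySem.Int.mod (((t : Int) + 1) * PySem.Int.mod k (inp.length : Int)) (inp.length : Int) := by
      simp only [PySem.Int.mod_eq_emod_of_pos hN]
      exact emod_step_ne _ _ _ hs0 hsN
    simp only [pvLoopA]
    rw [hin2, if_neg hneq]
    have hcast : ((t : Int) + 1) = (((t + 1 : Nat)) : Int) := by push_cast; ring
    rw [hcast, ih (t + 1) _ (by omega), List.range'_succ]
    simp only [List.flatMap_cons, pvChunkS, List.append_assoc]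
    push_cast
    rfl

-- loop lemma, k ≥ 0, step = 0: the pointer at iteration t is t
lemma loopA_zero (inp : List Int) (k : Int) (hk : 0 ≤ k)
    (hstep : PySem.Int.mod k (inp.length : Int) = 0) :
    ∀ (m t : Nat) (out : List Char), t + m = inp.length →
      pvLoopA inp k m (t : Int) out
        = out ++ (List.range' t m).flatMap (fun s => pvChunk0 inp s ++ (", ").toList) := by
  intro m
  induction m with
  | zero => intro t out h; simp [pvLoopA]
  | succ m ih =>
    intro t out h
    have hn : 0 < inp.length := by omega
    have hN : (0 : Int) < (inp.length : Int) := by exact_mod_cast hn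
    have hkN : k % (inp.length : Int) = 0 := by
      rw [← PySem.Int.mod_eq_emod_of_pos hN]; exact hstep
    have htN : (t : Int) < (inp.length : Int) := by exact_mod_cast (by omega : t < inp.length)
    have hin2 : pvRed ((t : Int) + k) (inp.length : Int) = (t : Int) := by
      rw [pvRed_emod _ _ (by omega) hN, Int.add_emod, hkN, add_zero,
        Int.emod_emod_of_dvd _ dvd_rfl, Int.emod_eq_of_lt (by omega) htN]
    simp only [pvLoopA]
    rw [hin2, if_pos rfl]
    have hcast : ((t : Int) + 1) = (((t + 1 : Nat)) : Int) := by push_cast; ring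
    rw [hcast, ih (t + 1) _ (by omega), List.range'_succ]
    simp only [List.flatMap_cons, pvChunk0, List.append_assoc]

-- loop lemma, k = -1, n ≥ 2: the pointer at iteration t is -t, reading element (-t) mod n
lemma loopA_neg (inp : List Int) (hn2 : 2 ≤ inp.length) :
    ∀ (m t : Nat) (out : List Char), t + m = inp.length →
      pvLoopA inp (-1) m (-(t : Int)) out
        = out ++ (List.range' t m).flatMap
            (fun s => pvChunkS inp (PySem.Int.mod (-1) (inp.length : Int)) s ++ (", ").toList) := by
  intro m
  induction m with
  | zero => intro t out h; simp [pvLoopA]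
  | succ m ih =>
    intro t out h
    have hn : 0 < inp.length := by omega
    have hN : (0 : Int) < (inp.length : Int) := by exact_mod_cast hn
    have htN : (t : Int) < (inp.length : Int) := by exact_mod_cast (by omega : t < inp.length)
    have hin2 : pvRed (-(t : Int) + -1) (inp.length : Int) = -(t : Int) + -1 :=
      pvRed_of_lt _ _ (by omega)
    have hidx : ∀ u : Nat, (u : Int) ≤ (inp.length : Int) →
        PySem.List.pyGetD inp (-(u : Int)) 0
          = PySem.List.pyGetD inp
              (PySem.Int.mod ((u : Int) * PySem.Int.mod (-1) (inp.length : Int)) (inp.length : Int)) 0 := by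
      intro u hu
      rw [pyGetD_emod inp (-(u : Int)) (by omega) (by omega)]
      congr 1
      rw [PySem.Int.mod_eq_emod_of_pos hN, mod_neg_one _ hN]
      have e : (u : Int) * ((inp.length : Int) - 1) = -(u : Int) + (inp.length : Int) * u := by ring
      rw [e, Int.add_mul_emod_self_left]
    simp only [pvLoopA]
    rw [hin2, if_neg (by omega)]
    have hcast : -(t : Int) + -1 = -(((t + 1 : Nat)) : Int) := by push_cast; ring
    rw [hcast, ih (t + 1) _ (by omega), List.range'_succ]
    simp only [List.flatMap_cons, pvChunkS, List.append_assoc]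
    rw [← hidx t (by omega)]
    have hidx2 := hidx (t + 1) (by exact_mod_cast (by omega : t + 1 ≤ inp.length))
    push_cast at hidx2 ⊢
    rw [hidx2]

-- ===== VERDICT (by name: the statement is the Claim_ definition above) =====
theorem k_mapping_spec : Claim_equal_k_mapping := by
  intro inp k _ hpre
  unfold Spec_k_mapping
  by_cases hnil : inp = []
  · subst hnil; rfl
  · have hn : 0 < inp.length := List.length_pos_of_ne_nil hnil
    have hN : (0 : Int) < (inp.length : Int) := by exact_mod_cast hn
    have hne0 : inp.length ≠ 0 := by omega
    by_cases hk : 0 ≤ k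
    · by_cases hs : PySem.Int.mod k (inp.length : Int) = 0
      · have hA := loopA_zero inp k hk hs inp.length 0 [] (by omega)
        simp only [Nat.cast_zero, List.nil_append] at hA
        have hOut : pvLoopA inp k inp.length 0 [] =
            ((List.range inp.length).map (pvChunk0 inp)).flatMap (fun p => p ++ (", ").toList) := by
          rw [hA]
          simp [List.flatMap_map, List.range_eq_range']
        simp only [k_mapping, k_mapping_alt]
        rw [hOut, if_neg hne0, if_pos hs, assemble, map_chunk0]
      · have hA := loopA_pos inp k hk hs inp.length 0 [] (by omega)
        have h0 : PySem.Int.mod ((0 : Int) * PySem.Int.mod k (inp.length : Int)) (inp.length : Int) = 0 := by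
          rw [PySem.Int.mod_eq_emod_of_pos hN]; simp
        simp only [Nat.cast_zero, List.nil_append] at hA
        rw [h0] at hA
        have hOut : pvLoopA inp k inp.length 0 [] =
            ((List.range inp.length).map (pvChunkS inp (PySem.Int.mod k (inp.length : Int)))).flatMap
              (fun p => p ++ (", ").toList) := by
          rw [hA]
          simp [List.flatMap_map, List.range_eq_range']
        simp only [k_mapping, k_mapping_alt]
        rw [hOut, if_neg hne0, if_neg hs, assemble]
        rfl
    · have hk1 : k = -1 := by
        rcases hpre with h | h
        · exact absurd h hnil
        · omega
      subst hk1
      by_cases hn2 : 2 ≤ inp.length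
      · have hN2 : (2 : Int) ≤ (inp.length : Int) := by exact_mod_cast hn2
        have hs : PySem.Int.mod (-1) (inp.length : Int) ≠ 0 := by
          rw [mod_neg_one _ hN]; omega
        have hA := loopA_neg inp hn2 inp.length 0 [] (by omega)
        simp only [Nat.cast_zero, neg_zero, List.nil_append] at hA
        have hOut : pvLoopA inp (-1) inp.length 0 [] =
            ((List.range inp.length).map (pvChunkS inp (PySem.Int.mod (-1) (inp.length : Int)))).flatMap
              (fun p => p ++ (", ").toList) := by
          rw [hA]
          simp [List.flatMap_map, List.range_eq_range']
        simp only [k_mapping, k_mapping_alt]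
        rw [hOut, if_neg hne0, if_neg hs, assemble]
        rfl
      · have hn1 : inp.length = 1 := by omega
        obtain ⟨a, ha⟩ : ∃ a, inp = [a] := by
          cases inp with
          | nil => simp at hn1
          | cons a l =>
            cases l with
            | nil => exact ⟨a, rfl⟩
            | cons b l' => simp at hn1
        subst ha
        have hstep1 : PySem.Int.mod (-1) (1 : Int) = 0 := by decide
        have hga : PySem.List.pyGetD [a] (0 : Int) 0 = a := by
          simp [PySem.List.pyGetD, PySem.List.pyGet?, PySem.List.pyIdx?]
        have hgb : PySem.List.pyGetD [a] (-1 : Int) 0 = a := by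
          simp [PySem.List.pyGetD, PySem.List.pyGet?, PySem.List.pyIdx?]
        have hred : pvRed (-1 : Int) (1 : Int) = -1 := pvRed_of_lt _ _ (by norm_num)
        have houtval : pvLoopA [a] (-1) ([a] : List Int).length 0 [] =
            (PySem.Int.toChars a ++ (" -> ").toList ++ PySem.Int.toChars a) ++ (", ").toList := by
          simp [pvLoopA, hga, hgb, hred, List.append_assoc]
        simp only [k_mapping, k_mapping_alt]
        rw [houtval, slice_drop2 _ (by simp; omega), take_append_sub _ _ (by decide)]
        simp [PySem.Chars.join_singleton]

@[simp] theorem k_mapping_raises : Claim_raises_k_mapping := by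
  unfold Claim_raises_k_mapping
  constructor
  · intro inp k _ hr hp
    rcases hr with ⟨hne, hk⟩
    rcases hp with h | h
    · exact hne h
    · omega
  · refine ⟨by decide, by decide, by decide⟩
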